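-- pv_equiv track=rewrite | github.com/open2c/cooler | src/cooler/reduce.py | preferred_sequence
-- ===== SOURCE A (Python) =====
-- def geomprog(start, mul):
--     """
--     Generate a geometric progression of integers.
--
--     Beginning with integer ``start``, yield an unbounded geometric progression
--     with integer ratio ``mul``.
--
--     """
--     start, mul = int(start), int(mul)
--     yield start
--     while True:
--         start *= mul
--         yield start
--
-- def niceprog(start):
--     """
--     Generate a nice progression of integers.
--
--     Beginning with integer ``start``, yield a sequence of "nicely" spaced
--     integers: an unbounded geometric progression with ratio 10, interspersed
--     with steps of ratios 2 and 5.
--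
--     """
--     start = int(start)
--     yield start
--     while True:
--         for mul in (2, 5, 10):
--             yield start * mul
--         start *= 10
--
-- def preferred_sequence(start, stop, style="nice"):
--     """
--     Return a sequence of integers with a "preferred" stepping pattern.
--
--     Parameters
--     ----------
--     start : int
--         Starting value in the progression.
--     stop : int
--         Upper bound of progression, inclusive. Values will not exceed this.
--     style : {'nice', 'binary'}
--         Style of progression. 'nice' gives geometric steps of 10 with 2 and 5
--         in between. 'binary' gives geometric steps of 2.
--
--     Returns
--     ------
--     list of int
--
--     Examples
--     --------
--     For certain values of `start` (n * 10^i), nice stepping produces familiar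
--     "preferred" sequences [1]_:
--
--     Note denominations in Dollars (1-2-5)
--
--         >>> preferred_sequence(1, 100, 'nice')
--         [1, 2, 5, 10, 20, 50, 100]
--
--
--     Coin denominations in Cents
--
--         >>> preferred_sequence(5, 100, 'nice')
--         [5, 10, 25, 50, 100]
--
--     .. [1] https://en.wikipedia.org/wiki/Preferred_number#1-2-5_series
--
--     """
--     if start > stop:
--         return []
--
--     if style == "binary":
--         gen = geomprog(start, 2)
--     elif style == "nice":
--         gen = niceprog(start)
--     else:
--         ValueError(f"Expected style value of 'binary' or 'nice'; got '{style}'.")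
--
--     seq = [next(gen)]
--     while True:
--         n = next(gen)
--         if n > stop:
--             break
--         seq.append(n)
--
--     return seq
-- ===== SOURCE B (Python) =====
-- def preferred_sequence(start, stop, style="nice"):
--     if start > stop:
--         return []
--     start = int(start)
--     if style == "binary":
--         mults, ratio = (1,), 2
--     elif style == "nice":
--         mults, ratio = (1, 2, 5), 10
--     else:
--         raise ValueError(f"Expected style value of 'binary' or 'nice'; got '{style}'.")
--     decades = []
--     p = 1
--     while start * p <= stop:
--         decades.append(p)
--         p *= ratio
--     return [start * m * p for p in decades for m in mults if start * m * p <= stop]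
-- ===== Notes on version B (the rewrite author's own statement) =====
-- stated objective: alternative
-- what changed: Replaces A's generator objects and next()-driven consumer loop by two staged passes: first materialize the list of decade powers (ratio 2 or 10, from a style table), then a single comprehension over (decade, multiplier) pairs with a <= stop filter; also actually raises the ValueError that A constructs but forgets to raise (that path is outside Pre_ since A hits a NameError there).
import Mathlib
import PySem

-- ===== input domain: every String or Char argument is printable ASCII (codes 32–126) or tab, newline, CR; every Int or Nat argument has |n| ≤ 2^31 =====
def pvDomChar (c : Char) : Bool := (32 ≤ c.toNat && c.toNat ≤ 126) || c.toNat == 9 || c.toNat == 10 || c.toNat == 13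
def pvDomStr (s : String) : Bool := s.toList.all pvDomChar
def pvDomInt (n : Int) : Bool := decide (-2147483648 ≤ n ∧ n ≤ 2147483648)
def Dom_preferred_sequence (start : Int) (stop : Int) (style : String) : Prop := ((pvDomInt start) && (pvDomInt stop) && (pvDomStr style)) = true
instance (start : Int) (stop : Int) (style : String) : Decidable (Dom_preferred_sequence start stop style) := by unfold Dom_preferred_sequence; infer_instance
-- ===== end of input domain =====

-- B replaces A's generator/next() machinery by two staged passes: materialize the decade powers, then one filtered comprehension over (decade, multiplier) pairs; alternative decomposition, not claimed faster.

-- ===== PORT A =====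
-- the state of the geomprog(start, 2) generator after its first yield: the current value `start`
def pvNextBin (s : Int) : Int × Int := (s * 2, s * 2)
-- the state of the niceprog generator after its first yield: (current `start`, position in (2,5,10))
def pvNextNice : Int × Nat → Int × (Int × Nat)
  | (s, 0) => (s * 2, (s, 1))
  | (s, 1) => (s * 5, (s, 2))
  | (s, _) => (s * 10, (s * 10, 0))

-- A's `while True: n = next(gen); if n > stop: break; seq.append(n)` loop; seq kept reversed,
-- fuel makes the unbounded Python loop a total Lean function (ample inside Pre_, where values grow past stop)
def pvLoopA {σ : Type} (next : σ → Int × σ) (stop : Int) : Nat → σ → List Int → List Int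
  | 0, _, acc => acc.reverse
  | Nat.succ f, st, acc =>
      let p := next st
      if p.1 > stop then acc.reverse else pvLoopA next stop f p.2 (p.1 :: acc)

def preferred_sequence (start : Int) (stop : Int) (style : String) : List Int :=
  if start > stop then []
  else if style = "binary" then pvLoopA pvNextBin stop 300 start [start]
  else if style = "nice" then pvLoopA pvNextNice stop 302 (start, 0) [start]
  else []  -- Python raises NameError here (unbound `gen`); excluded by Pre_

-- ===== PORT B =====
-- B's first pass: `while start * p <= stop: decades.append(p); p *= ratio`
def pvDecades (start stop ratio : Int) : Nat → Int → List Int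
  | 0, _ => []
  | Nat.succ f, p => if start * p ≤ stop then p :: pvDecades start stop ratio f (p * ratio) else []
-- B's second pass: `[start * m * p for p in decades for m in mults if start * m * p <= stop]`
def pvEmit (start stop : Int) (mults : List Int) (decades : List Int) : List Int :=
  decades.flatMap (fun p => mults.filterMap (fun m => if start * m * p ≤ stop then some (start * m * p) else none))

def preferred_sequence_alt (start : Int) (stop : Int) (style : String) : List Int :=
  if start > stop then []
  else if style = "binary" then pvEmit start stop [1] (pvDecades start stop 2 301 1)
  else if style = "nice" then pvEmit start stop [1, 2, 5] (pvDecades start stop 10 101 1)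
  else []  -- B raises ValueError here; excluded by Pre_

-- ===== PRECONDITION & SPEC =====
-- Pre_ excludes only inputs where A does not return: invalid style with start ≤ stop (NameError)
-- and start ≤ 0 with start ≤ stop (the generator never exceeds stop, so A loops forever).
def Pre_preferred_sequence (start : Int) (stop : Int) (style : String) : Prop :=
  start > stop ∨ ((style = "nice" ∨ style = "binary") ∧ 1 ≤ start)
instance (start : Int) (stop : Int) (style : String) : Decidable (Pre_preferred_sequence start stop style) := by
  unfold Pre_preferred_sequence; infer_instance
def pvWitness_preferred_sequence : Int × Int × String := (1, 100, "nice")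

def Spec_preferred_sequence (start : Int) (stop : Int) (style : String) (out : List Int) : Prop := out = preferred_sequence_alt start stop style
instance (start : Int) (stop : Int) (style : String) (out : List Int) : Decidable (Spec_preferred_sequence start stop style out) := by unfold Spec_preferred_sequence; infer_instance

-- ===== CLAIM (what is proved, stated in full; the proofs are below) =====
def Claim_equal_preferred_sequence : Prop := ∀ (start : Int) (stop : Int) (style : String), Dom_preferred_sequence start stop style → Pre_preferred_sequence start stop style → Spec_preferred_sequence start stop style (preferred_sequence start stop style)

-- ===== LEMMAS AND PROOFS =====

theorem pvDecades_step (start stop r p : Int) (f : Nat) :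
    pvDecades start stop r (f + 1) p
      = if start * p ≤ stop then p :: pvDecades start stop r f (p * r) else [] := rfl

theorem pvEmit_cons (start stop : Int) (mults : List Int) (p : Int) (d : List Int) :
    pvEmit start stop mults (p :: d)
      = mults.filterMap (fun m => if start * m * p ≤ stop then some (start * m * p) else none)
          ++ pvEmit start stop mults d := by
  simp [pvEmit]

theorem pv_bin_eq (start stop : Int) : ∀ (f : Nat) (p : Int) (acc : List Int),
    pvLoopA pvNextBin stop f (start * p) acc
      = acc.reverse ++ pvEmit start stop [1] (pvDecades start stop 2 f (p * 2)) := by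
  intro f
  induction f with
  | zero => intro p acc; simp [pvLoopA, pvDecades, pvEmit]
  | succ f ih =>
      intro p acc
      have e : start * p * 2 = start * (p * 2) := by ring
      simp only [pvLoopA, pvDecades, pvNextBin, e]
      by_cases h : start * (p * 2) > stop
      · simp [h, not_le.mpr h, pvEmit]
      · have h' : start * (p * 2) ≤ stop := not_lt.mp h
        rw [if_neg h, if_pos h']
        rw [ih (p * 2) (start * (p * 2) :: acc)]
        have e1 : start * 1 * (p * 2) = start * (p * 2) := by ring
        simp [pvEmit, e1, h']

theorem pv_nice_eq (start stop : Int) (hs : 1 ≤ start) : ∀ (f : Nat) (p : Int), 1 ≤ p → ∀ (acc : List Int),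
    pvLoopA pvNextNice stop (2 + 3 * f) (start * p, 0) acc
      = acc.reverse
        ++ (if start * 2 * p ≤ stop then [start * 2 * p] else [])
        ++ (if start * 5 * p ≤ stop then [start * 5 * p] else [])
        ++ pvEmit start stop [1, 2, 5] (pvDecades start stop 10 f (p * 10)) := by
  intro f
  induction f with
  | zero =>
      intro p hp acc
      simp only [pvLoopA, pvNextNice, pvDecades, pvEmit]
      by_cases h2 : start * p * 2 > stop
      · have h5 : start * p * 5 > stop := by nlinarith
        have e2 : start * 2 * p = start * p * 2 := by ring
        have e5 : start * 5 * p = start * p * 5 := by ring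
        simp [h2, e2, e5, not_le.mpr h2, not_le.mpr h5]
      · rw [if_neg h2]
        by_cases h5 : start * p * 5 > stop
        · have e2 : start * 2 * p = start * p * 2 := by ring
          have e5 : start * 5 * p = start * p * 5 := by ring
          simp [h5, e2, e5, not_lt.mp h2, not_le.mpr h5]
        · have e2 : start * 2 * p = start * p * 2 := by ring
          have e5 : start * 5 * p = start * p * 5 := by ring
          simp [h5, e2, e5, not_lt.mp h2, not_lt.mp h5]
  | succ f ih =>
      intro p hp acc
      have hfuel : 2 + 3 * (f + 1) = Nat.succ (Nat.succ (Nat.succ (2 + 3 * f))) := by omega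
      have e2 : start * p * 2 = start * 2 * p := by ring
      have e5 : start * p * 5 = start * 5 * p := by ring
      have e10 : start * p * 10 = start * (p * 10) := by ring
      rw [hfuel]
      simp only [pvLoopA, pvNextNice, e2, e5, e10]
      by_cases h2 : start * 2 * p > stop
      · have h5 : start * 5 * p > stop := by nlinarith
        have h10 : ¬ start * (p * 10) ≤ stop := by push Not; nlinarith
        simp [h2, not_le.mpr h2, not_le.mpr h5, pvDecades, h10, pvEmit]
      · rw [if_neg h2]
        by_cases h5 : start * 5 * p > stop
        · have h10 : ¬ start * (p * 10) ≤ stop := by push Not; nlinarith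
          simp [h5, not_lt.mp h2, not_le.mpr h5, pvDecades, h10, pvEmit]
        · rw [if_neg h5]
          by_cases h10 : start * (p * 10) > stop
          · simp [h10, not_lt.mp h2, not_lt.mp h5, pvDecades, not_le.mpr h10, pvEmit]
          · rw [if_neg h10]
            have hp10 : (1 : Int) ≤ p * 10 := by nlinarith
            rw [ih (p * 10) hp10 (start * (p * 10) :: start * 5 * p :: start * 2 * p :: acc)]
            have b1 : start * 1 * (p * 10) = start * (p * 10) := by ring
            simp [pvDecades, not_lt.mp h10, pvEmit, not_lt.mp h2, not_lt.mp h5]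
            simp only [List.filterMap_cons, List.filterMap_nil]
            split_ifs <;> simp

-- ===== VERDICT (by name: the statement is the Claim_ definition above) =====
theorem preferred_sequence_spec : Claim_equal_preferred_sequence := by
  intro start stop style _ hpre
  unfold Spec_preferred_sequence preferred_sequence preferred_sequence_alt
  by_cases hgt : start > stop
  · simp [hgt]
  · rw [if_neg hgt, if_neg hgt]
    have hle : start ≤ stop := not_lt.mp hgt
    have hle1 : start * 1 ≤ stop := by rwa [mul_one]
    by_cases hb : style = "binary"
    · rw [if_pos hb, if_pos hb]
      have hA := pv_bin_eq start stop 300 1 [start]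
      rw [mul_one] at hA
      rw [hA, show (301 : Nat) = 300 + 1 from rfl, pvDecades_step start stop 2 1 300, if_pos hle1, pvEmit_cons]
      have e1 : start * 1 * 1 = start := by ring
      simp [e1, hle]
    · rw [if_neg hb, if_neg hb]
      by_cases hn : style = "nice"
      · rw [if_pos hn, if_pos hn]
        have hs : 1 ≤ start := by
          rcases hpre with h | ⟨_, h⟩
          · exact absurd h hgt
          · exact h
        have hA := pv_nice_eq start stop hs 100 1 le_rfl [start]
        rw [mul_one] at hA
        rw [show (302 : Nat) = 2 + 3 * 100 from rfl, hA,
            show (101 : Nat) = 100 + 1 from rfl, pvDecades_step start stop 10 1 100, if_pos hle1, pvEmit_cons]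
        have e1 : start * 1 * 1 = start := by ring
        simp [e1, hle]
        simp only [List.filterMap_cons, List.filterMap_nil]
        split_ifs <;> simp
      · rcases hpre with h | ⟨hs, _⟩
        · exact absurd h hgt
        · rcases hs with h | h <;> [exact absurd h hn; exact absurd h hb]
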